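-- pv_equiv track=rewrite | github.com/yasi76/work2 | ENHANCED_DISCOVERY_HEALTHCARE_DATABASE.py | determine_healthcare_type
-- ===== SOURCE A (Python) =====
-- def determine_healthcare_type(url, content, title):
--     """Determine healthcare type from URL and content"""
--     text = f"{url} {content} {title}".lower()
--
--     if any(keyword in text for keyword in ['ai', 'artificial intelligence', 'machine learning', 'ml', 'deep learning']):
--         return 'AI/ML Healthcare'
--     elif any(keyword in text for keyword in ['telemedicine', 'telehealth', 'digital health', 'remote', 'virtual']):
--         return 'Digital Health'
--     elif any(keyword in text for keyword in ['biotech', 'biotechnology', 'drug', 'pharmaceutical', 'therapy']):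
--         return 'Biotechnology'
--     elif any(keyword in text for keyword in ['medical device', 'diagnostic', 'monitoring', 'equipment']):
--         return 'Medical Devices'
--     elif any(keyword in text for keyword in ['mental health', 'psychology', 'therapy', 'wellness']):
--         return 'Mental Health'
--     else:
--         return 'Healthcare Services'
-- ===== SOURCE B (Python) =====
-- LABELS = ['AI/ML Healthcare', 'Digital Health', 'Biotechnology',
--           'Medical Devices', 'Mental Health', 'Healthcare Services']
--
-- KEYWORD_PRIORITY = [
--     ('ai', 0), ('artificial intelligence', 0), ('machine learning', 0), ('ml', 0), ('deep learning', 0),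
--     ('telemedicine', 1), ('telehealth', 1), ('digital health', 1), ('remote', 1), ('virtual', 1),
--     ('biotech', 2), ('biotechnology', 2), ('drug', 2), ('pharmaceutical', 2), ('therapy', 2),
--     ('medical device', 3), ('diagnostic', 3), ('monitoring', 3), ('equipment', 3),
--     ('mental health', 4), ('psychology', 4), ('therapy', 4), ('wellness', 4),
-- ]
--
-- def determine_healthcare_type(url, content, title):
--     text = f"{url} {content} {title}".lower()
--     best = 5
--     for keyword, prio in KEYWORD_PRIORITY:
--         if prio < best and keyword in text:
--             best = prio
--     return LABELS[best]
-- ===== Notes on version B (the rewrite author's own statement) =====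
-- stated objective: alternative
-- what changed: Replaces the five-branch if/elif chain of grouped any() tests with a single pass over a flat (keyword, priority) list that folds a minimum-priority accumulator, then indexes the label list by the best priority found.
import Mathlib
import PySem

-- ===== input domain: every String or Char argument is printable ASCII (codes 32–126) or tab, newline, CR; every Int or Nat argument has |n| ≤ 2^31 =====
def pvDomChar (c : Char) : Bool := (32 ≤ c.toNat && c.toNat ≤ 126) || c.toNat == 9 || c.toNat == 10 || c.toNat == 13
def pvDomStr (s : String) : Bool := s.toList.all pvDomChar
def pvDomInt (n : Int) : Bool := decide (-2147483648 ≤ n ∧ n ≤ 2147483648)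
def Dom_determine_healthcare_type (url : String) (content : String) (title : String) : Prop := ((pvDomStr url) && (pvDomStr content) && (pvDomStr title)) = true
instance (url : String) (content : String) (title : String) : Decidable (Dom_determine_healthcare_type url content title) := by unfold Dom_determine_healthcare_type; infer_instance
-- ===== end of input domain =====

-- B replaces A's if/elif chain of grouped any() tests by one pass over a flat (keyword, priority)
-- list folding a minimum-priority accumulator, then indexes the label list (alternative; same cost).
-- ===== PORT A =====
def determine_healthcare_type (url : String) (content : String) (title : String) : String :=
  let text := PySem.Str.lower (PySem.Str.join " " [url, content, title])
  if ["ai", "artificial intelligence", "machine learning", "ml", "deep learning"].any (fun k => PySem.Str.isIn k text) then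
    "AI/ML Healthcare"
  else if ["telemedicine", "telehealth", "digital health", "remote", "virtual"].any (fun k => PySem.Str.isIn k text) then
    "Digital Health"
  else if ["biotech", "biotechnology", "drug", "pharmaceutical", "therapy"].any (fun k => PySem.Str.isIn k text) then
    "Biotechnology"
  else if ["medical device", "diagnostic", "monitoring", "equipment"].any (fun k => PySem.Str.isIn k text) then
    "Medical Devices"
  else if ["mental health", "psychology", "therapy", "wellness"].any (fun k => PySem.Str.isIn k text) then
    "Mental Health"
  else
    "Healthcare Services"

-- ===== PORT B =====
def pvLabels : List String :=
  ["AI/ML Healthcare", "Digital Health", "Biotechnology",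
   "Medical Devices", "Mental Health", "Healthcare Services"]

def pvKeywordPriority : List (String × Nat) :=
  [("ai", 0), ("artificial intelligence", 0), ("machine learning", 0), ("ml", 0), ("deep learning", 0),
   ("telemedicine", 1), ("telehealth", 1), ("digital health", 1), ("remote", 1), ("virtual", 1),
   ("biotech", 2), ("biotechnology", 2), ("drug", 2), ("pharmaceutical", 2), ("therapy", 2),
   ("medical device", 3), ("diagnostic", 3), ("monitoring", 3), ("equipment", 3),
   ("mental health", 4), ("psychology", 4), ("therapy", 4), ("wellness", 4)]

def determine_healthcare_type_alt (url : String) (content : String) (title : String) : String :=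
  let text := PySem.Str.lower (PySem.Str.join " " [url, content, title])
  let best := pvKeywordPriority.foldl
    (fun best kp => if kp.2 < best ∧ PySem.Str.isIn kp.1 text = true then kp.2 else best) 5
  pvLabels.getD best "Healthcare Services"

-- ===== PRECONDITION & SPEC =====
def Spec_determine_healthcare_type (url : String) (content : String) (title : String) (out : String) : Prop := out = determine_healthcare_type_alt url content title
instance (url : String) (content : String) (title : String) (out : String) : Decidable (Spec_determine_healthcare_type url content title out) := by unfold Spec_determine_healthcare_type; infer_instance

-- ===== CLAIM (what is proved, stated in full; the proofs are below) =====
def Claim_equal_determine_healthcare_type : Prop := ∀ (url : String) (content : String) (title : String), Dom_determine_healthcare_type url content title → Spec_determine_healthcare_type url content title (determine_healthcare_type url content title)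

-- ===== LEMMAS AND PROOFS =====
-- Folding the min-priority update over one priority group (all pairs share priority i)
-- either lowers the accumulator to i (if i is smaller and some keyword matches) or keeps it.
theorem pvGroupFold (text : String) (i : Nat) (ks : List String) :
    ∀ acc : Nat,
      (ks.map (fun k => (k, i))).foldl
        (fun best kp => if kp.2 < best ∧ PySem.Str.isIn kp.1 text = true then kp.2 else best) acc
      = if i < acc ∧ ks.any (fun k => PySem.Str.isIn k text) = true then i else acc := by
  induction ks with
  | nil => intro acc; simp
  | cons k ks ih =>
    intro acc
    simp only [List.map, List.foldl, List.any_cons, Bool.or_eq_true]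
    by_cases hlt : i < acc
    · by_cases hm : PySem.Str.isIn k text = true
      · rw [if_pos ⟨hlt, hm⟩, ih i, if_neg (fun h => absurd h.1 (lt_irrefl i)),
            if_pos ⟨hlt, Or.inl hm⟩]
      · rw [if_neg (fun h => hm h.2), ih acc]
        by_cases hany : (ks.any fun k => PySem.Str.isIn k text) = true
        · rw [if_pos ⟨hlt, hany⟩, if_pos ⟨hlt, Or.inr hany⟩]
        · rw [if_neg (fun h => hany h.2), if_neg (fun h => h.2.elim (fun h1 => hm h1) hany)]
    · rw [if_neg (fun h => hlt h.1), ih acc, if_neg (fun h => hlt h.1), if_neg (fun h => hlt h.1)]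

theorem determine_healthcare_type_eq_alt (url content title : String) :
    determine_healthcare_type url content title = determine_healthcare_type_alt url content title := by
  unfold determine_healthcare_type determine_healthcare_type_alt
  have hsplit : pvKeywordPriority =
      (["ai", "artificial intelligence", "machine learning", "ml", "deep learning"].map (fun k => (k, 0)))
      ++ (["telemedicine", "telehealth", "digital health", "remote", "virtual"].map (fun k => (k, 1)))
      ++ (["biotech", "biotechnology", "drug", "pharmaceutical", "therapy"].map (fun k => (k, 2)))
      ++ (["medical device", "diagnostic", "monitoring", "equipment"].map (fun k => (k, 3)))
      ++ (["mental health", "psychology", "therapy", "wellness"].map (fun k => (k, 4))) := by rfl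
  rw [hsplit]
  simp only [List.foldl_append, pvGroupFold]
  generalize PySem.Str.lower (PySem.Str.join " " [url, content, title]) = t
  generalize (["ai", "artificial intelligence", "machine learning", "ml", "deep learning"].any (fun k => PySem.Str.isIn k t)) = b1
  generalize (["telemedicine", "telehealth", "digital health", "remote", "virtual"].any (fun k => PySem.Str.isIn k t)) = b2
  generalize (["biotech", "biotechnology", "drug", "pharmaceutical", "therapy"].any (fun k => PySem.Str.isIn k t)) = b3
  generalize (["medical device", "diagnostic", "monitoring", "equipment"].any (fun k => PySem.Str.isIn k t)) = b4
  generalize (["mental health", "psychology", "therapy", "wellness"].any (fun k => PySem.Str.isIn k t)) = b5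
  cases b1 <;> cases b2 <;> cases b3 <;> cases b4 <;> cases b5 <;> rfl

-- ===== VERDICT (by name: the statement is the Claim_ definition above) =====
theorem determine_healthcare_type_spec : Claim_equal_determine_healthcare_type := by
  intro url content title _
  exact determine_healthcare_type_eq_alt url content title
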